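-- pv_equiv track=rewrite | github.com/MikeChav/SCT_Code | pluralityexamples.py | winners
-- ===== SOURCE A (Python) =====
-- def winners(profile, candidates):
--     if len(candidates) == 0:
--         return []
--     counts = {c: 0 for c in candidates}
--     for vote in profile:
--         counts[vote[0]] += 1
--     potential_winner = max(counts, key=counts.get)
--     return [t for t in candidates if counts[t] == counts[potential_winner]]
-- ===== SOURCE B (Python) =====
-- def winners(profile, candidates):
--     if len(candidates) == 0:
--         return []
--     counts = {c: 0 for c in candidates}
--     for vote in profile:
--         counts[vote[0]] += 1
--     groups = {}
--     for c in candidates: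
--         groups.setdefault(counts[c], []).append(c)
--     return groups[max(groups)]
-- ===== Notes on version B (the rewrite author's own statement) =====
-- stated objective: alternative
-- what changed: B replaces A's argmax-over-dict-keys followed by a filtering rescan of candidates with an inverted count->candidates grouping dict built in one pass over candidates, returning the group of the maximal count key.
import Mathlib
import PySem

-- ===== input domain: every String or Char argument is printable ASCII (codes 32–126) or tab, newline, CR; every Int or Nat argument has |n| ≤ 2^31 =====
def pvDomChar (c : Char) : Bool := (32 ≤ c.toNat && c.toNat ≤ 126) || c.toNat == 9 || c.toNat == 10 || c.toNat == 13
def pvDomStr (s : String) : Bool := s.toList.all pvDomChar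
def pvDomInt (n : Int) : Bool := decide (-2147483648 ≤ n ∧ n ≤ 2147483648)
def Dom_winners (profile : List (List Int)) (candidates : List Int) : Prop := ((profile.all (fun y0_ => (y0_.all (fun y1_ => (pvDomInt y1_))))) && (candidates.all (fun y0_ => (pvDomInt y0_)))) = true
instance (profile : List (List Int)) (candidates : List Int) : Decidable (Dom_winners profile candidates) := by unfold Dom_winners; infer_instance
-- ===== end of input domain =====

-- B inverts the representation: a count -> candidates grouping dict selected by its maximal key,
-- instead of A's argmax over dict keys followed by a second filtering scan of candidates.

-- ===== PORT A =====
def winners (profile : List (List Int)) (candidates : List Int) : List Int :=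
  if candidates.length = 0 then []
  else
    let counts0 : PySem.Dict Int Int := candidates.foldl (fun d c => d.insert c 0) PySem.Dict.empty
    let counts : PySem.Dict Int Int :=
      profile.foldl (fun d vote => d.modify vote.headI 0 (· + 1)) counts0
    match PySem.List.max? counts.keys (fun k => counts.getD k 0) with
    | none => []  -- unreachable: candidates is nonempty here
    | some pw => candidates.filter (fun t => counts.getD t 0 == counts.getD pw 0)

-- ===== PORT B =====
def winners_alt (profile : List (List Int)) (candidates : List Int) : List Int :=
  if candidates = [] then []
  else
    let counts : PySem.Dict Int Int :=
      profile.foldl (fun d vote => d.modify vote.headI 0 (· + 1))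
        (candidates.foldl (fun d c => d.insert c 0) PySem.Dict.empty)
    let groups : PySem.Dict Int (List Int) :=
      candidates.foldl (fun g c => g.modify (counts.getD c 0) [] (· ++ [c])) PySem.Dict.empty
    match PySem.List.max? groups.keys (fun k => k) with
    | none => []  -- unreachable: candidates is nonempty here
    | some m => groups.getD m []

-- ===== PRECONDITION & SPEC =====
-- Pre_ excludes exactly the inputs where Python A raises: with a nonempty candidate list, an empty
-- vote (IndexError on vote[0]) or a vote whose first entry is not a candidate (KeyError).
def Pre_winners (profile : List (List Int)) (candidates : List Int) : Prop :=
  candidates = [] ∨ ∀ vote ∈ profile, vote ≠ [] ∧ vote.headI ∈ candidates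
instance (profile : List (List Int)) (candidates : List Int) : Decidable (Pre_winners profile candidates) := by unfold Pre_winners; infer_instance

def pvWitness_winners : List (List Int) × List Int := ([[1], [2, 5], [1]], [1, 2, 3])

def Spec_winners (profile : List (List Int)) (candidates : List Int) (out : List Int) : Prop := out = winners_alt profile candidates
instance (profile : List (List Int)) (candidates : List Int) (out : List Int) : Decidable (Spec_winners profile candidates out) := by unfold Spec_winners; infer_instance

-- ===== CLAIM (what is proved, stated in full; the proofs are below) =====
def Claim_equal_winners : Prop := ∀ (profile : List (List Int)) (candidates : List Int), Dom_winners profile candidates → Pre_winners profile candidates → Spec_winners profile candidates (winners profile candidates)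

-- ===== LEMMAS AND PROOFS =====

-- keys of the counting dict: exactly the candidates together with the voted-for heads
theorem keys_counts (profile : List (List Int)) (candidates : List Int) (x : Int) :
    x ∈ (profile.foldl (fun d vote => d.modify vote.headI 0 (· + 1))
          (candidates.foldl (fun d c => d.insert c 0) (PySem.Dict.empty : PySem.Dict Int Int))).keys
    ↔ x ∈ candidates ∨ x ∈ profile.map List.headI := by
  rw [PySem.Dict.keys_foldl_modify_key, PySem.Dict.keys_foldl_insert,
    PySem.Set.mem_update, PySem.Set.mem_update]
  simp [PySem.Dict.keys, PySem.Dict.empty]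

-- extracting the group of a given count from the grouping fold
theorem groups_getD (candidates : List Int) (V : Int → Int) (m : Int) :
    (candidates.foldl (fun g c => g.modify (V c) [] (· ++ [c])) (PySem.Dict.empty : PySem.Dict Int (List Int))).getD m []
    = candidates.filter (fun c => V c == m) := by
  have h : ∀ (cs : List Int) (d : PySem.Dict Int (List Int)),
      cs.foldl (fun g c => g.modify (V c) [] (· ++ [c])) d
      = (cs.map (fun c => (V c, c))).foldl (fun g p => g.modify p.1 [] (· ++ [p.2])) d := by
    intro cs
    induction cs with
    | nil => intro d; rfl
    | cons a t ih => intro d; simp only [List.foldl_cons, List.map_cons]; exact ih _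
  rw [h, PySem.Dict.getD_foldl_modify_append]
  simp [List.filter_map, Function.comp_def, List.map_map]

-- keys of the grouping fold are exactly the occurring count values
theorem keys_groups (candidates : List Int) (V : Int → Int) (x : Int) :
    x ∈ (candidates.foldl (fun g c => g.modify (V c) [] (· ++ [c])) (PySem.Dict.empty : PySem.Dict Int (List Int))).keys
    ↔ x ∈ candidates.map V := by
  rw [PySem.Dict.keys_foldl_modify_key, PySem.Set.mem_update]
  simp [PySem.Dict.keys, PySem.Dict.empty]

-- ===== VERDICT (by name: the statement is the Claim_ definition above) =====
theorem winners_spec : Claim_equal_winners := by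
  intro profile candidates _ hpre
  unfold Spec_winners winners winners_alt
  by_cases hc : candidates = []
  · simp [hc]
  · have hlen : ¬ candidates.length = 0 := by simp [hc]
    simp only [hlen, hc, if_false]
    set counts : PySem.Dict Int Int :=
      profile.foldl (fun d vote => d.modify vote.headI 0 (· + 1))
        (candidates.foldl (fun d c => d.insert c 0) PySem.Dict.empty) with hcounts
    -- every member of counts.keys is a candidate (under Pre_)
    have hmemK : ∀ x, x ∈ counts.keys ↔ x ∈ candidates ∨ x ∈ profile.map List.headI := by
      intro x; rw [hcounts]; exact keys_counts profile candidates x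
    have hkeysub : ∀ x ∈ counts.keys, x ∈ candidates := by
      intro x hx
      rcases (hmemK x).1 hx with h | h
      · exact h
      · rcases List.mem_map.1 h with ⟨vote, hv, rfl⟩
        rcases hpre with h' | h'
        · exact absurd h' hc
        · exact (h' vote hv).2
    obtain ⟨c0, hc0⟩ : ∃ c0, c0 ∈ candidates := by
      cases candidates with
      | nil => exact absurd rfl hc
      | cons a t => exact ⟨a, List.mem_cons_self⟩
    have hc0K : c0 ∈ counts.keys := (hmemK c0).2 (Or.inl hc0)
    cases hA : PySem.List.max? counts.keys (fun k => counts.getD k 0) with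
    | none =>
        have hk : counts.keys = [] := (PySem.List.max?_eq_none_iff _ _).1 hA
        rw [hk] at hc0K
        simp at hc0K
    | some pw =>
        cases hB : PySem.List.max? (candidates.foldl (fun g c => g.modify (counts.getD c 0) [] (· ++ [c])) PySem.Dict.empty).keys (fun k => k) with
        | none =>
            have hk : (candidates.foldl (fun g c => g.modify (counts.getD c 0) [] (· ++ [c])) (PySem.Dict.empty : PySem.Dict Int (List Int))).keys = [] :=
              (PySem.List.max?_eq_none_iff _ _).1 hB
            have hm : counts.getD c0 0 ∈ (candidates.foldl (fun g c => g.modify (counts.getD c 0) [] (· ++ [c])) (PySem.Dict.empty : PySem.Dict Int (List Int))).keys :=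
              (keys_groups candidates (fun c => counts.getD c 0) (counts.getD c0 0)).2 (List.mem_map_of_mem hc0)
            rw [hk] at hm
            simp at hm
        | some m =>
            have hpwK : pw ∈ counts.keys := PySem.List.max?_mem hA
            have hpwC : pw ∈ candidates := hkeysub pw hpwK
            have hVpw_mem : counts.getD pw 0 ∈ (candidates.foldl (fun g c => g.modify (counts.getD c 0) [] (· ++ [c])) (PySem.Dict.empty : PySem.Dict Int (List Int))).keys :=
              (keys_groups candidates (fun c => counts.getD c 0) (counts.getD pw 0)).2 (List.mem_map_of_mem hpwC)
            have h1 : counts.getD pw 0 ≤ m := PySem.List.max?_isMax hB _ hVpw_mem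
            have hmK : m ∈ (candidates.foldl (fun g c => g.modify (counts.getD c 0) [] (· ++ [c])) (PySem.Dict.empty : PySem.Dict Int (List Int))).keys :=
              PySem.List.max?_mem hB
            obtain ⟨c, hcC, hcV⟩ := List.mem_map.1 ((keys_groups candidates (fun c => counts.getD c 0) m).1 hmK)
            have hcK : c ∈ counts.keys := (hmemK c).2 (Or.inl hcC)
            have h2 : m ≤ counts.getD pw 0 := hcV ▸ PySem.List.max?_isMax hA _ hcK
            have hVm : counts.getD pw 0 = m := le_antisymm h1 h2
            simp only [groups_getD, hVm]
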